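-- pv_equiv track=rewrite | github.com/thomas-young-2013/efficient-tlbo | tools/plot_online_ranking.py | get_ranking
-- ===== SOURCE A (Python) =====
-- from collections import Counter
--
-- def get_ranking(adtm_dict, num_ranking):
--     ranking_dict = {method: [] for method in adtm_dict.keys()}
--     for i in range(num_ranking):
--         _rank_dict = {}
--         value_dict = {}
--         for method in adtm_dict.keys():
--             value_dict[method] = adtm_dict[method][i]
--
--         sorted_item = sorted(value_dict.items(), key=lambda k: k[1])
--         cur_rank = 0
--         rank_gap = 1
--         for _idx, item in enumerate(sorted_item):
--             if cur_rank == 0: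
--                 cur_rank += 1
--                 _rank_dict[item[0]] = cur_rank
--             else:
--                 if item[1] == sorted_item[_idx - 1][1]:
--                     _rank_dict[item[0]] = cur_rank
--                     rank_gap += 1
--                 else:
--                     cur_rank += rank_gap
--                     rank_gap = 1
--                     _rank_dict[item[0]] = cur_rank
--         counter = Counter(_rank_dict.values())
--         for method in adtm_dict.keys():
--             ranking_dict[method].append(_rank_dict[method])
--     return ranking_dict
-- ===== SOURCE B (Python) =====
-- def get_ranking(adtm_dict, num_ranking):
--     # Competition ranking computed directly: rank = 1 + number of strictly smaller values.
--     methods = list(adtm_dict)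
--     return {m: [1 + sum(1 for o in methods if adtm_dict[o][i] < adtm_dict[m][i])
--                 for i in range(num_ranking)]
--             for m in methods}
-- ===== Notes on version B (the rewrite author's own statement) =====
-- stated objective: simpler
-- what changed: Replaces A's per-index sort plus cur_rank/rank_gap scan (and the dead Counter line) by directly computing each method's competition rank as 1 + the number of methods with a strictly smaller value at that index, building the result method-major.
import Mathlib
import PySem

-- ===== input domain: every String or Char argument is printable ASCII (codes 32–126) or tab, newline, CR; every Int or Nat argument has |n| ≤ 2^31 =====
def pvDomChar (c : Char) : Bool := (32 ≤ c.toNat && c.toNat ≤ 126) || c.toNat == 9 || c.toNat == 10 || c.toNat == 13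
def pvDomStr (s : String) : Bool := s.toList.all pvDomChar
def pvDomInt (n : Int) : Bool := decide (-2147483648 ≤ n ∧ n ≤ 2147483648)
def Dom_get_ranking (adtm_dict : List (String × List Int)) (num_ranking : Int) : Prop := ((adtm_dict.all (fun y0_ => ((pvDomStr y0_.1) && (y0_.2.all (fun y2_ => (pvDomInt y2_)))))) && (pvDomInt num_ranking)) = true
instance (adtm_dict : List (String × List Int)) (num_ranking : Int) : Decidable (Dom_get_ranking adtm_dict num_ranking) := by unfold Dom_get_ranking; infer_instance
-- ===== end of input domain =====

-- B replaces A's per-index sort + cur_rank/rank_gap scan by directly computing each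
-- competition rank as 1 + the number of methods with a strictly smaller value (objective: simpler).

-- ===== PORT A =====
-- the inner enumerate-loop body of A (cur_rank == 0 / tie / gap branches), state (_rank_dict, cur_rank, rank_gap)
def pvStepScan (sorted_item : List (String × Int))
    (s : PySem.Dict String Int × Int × Int) (ip : Int × (String × Int)) :
    PySem.Dict String Int × Int × Int :=
  if s.2.1 == 0 then
    (s.1.insert ip.2.1 (s.2.1 + 1), s.2.1 + 1, s.2.2)
  else if ip.2.2 == (PySem.List.pyGetD sorted_item (ip.1 - 1) ("", 0)).2 then
    (s.1.insert ip.2.1 s.2.1, s.2.1, s.2.2 + 1)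
  else
    (s.1.insert ip.2.1 (s.2.1 + s.2.2), s.2.1 + s.2.2, 1)

-- _rank_dict produced by A's 'for _idx, item in enumerate(sorted_item)' loop
def pvRankDict (sorted_item : List (String × Int)) : PySem.Dict String Int :=
  ((PySem.List.enumerate sorted_item).foldl (pvStepScan sorted_item)
    (PySem.Dict.empty, 0, 1)).1

-- value_dict built per index i
def pvValueDict (ad : PySem.Dict String (List Int)) (i : Int) : PySem.Dict String Int :=
  ad.keys.foldl (fun vd method =>
    vd.insert method (PySem.List.pyGetD (ad.getD method []) i 0)) PySem.Dict.empty

-- the body of A's 'for i in range(num_ranking)' loop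
def pvIndexStep (ad : PySem.Dict String (List Int))
    (ranking : PySem.Dict String (List Int)) (i : Int) : PySem.Dict String (List Int) :=
  let value_dict := pvValueDict ad i
  let sorted_item := PySem.List.sorted value_dict.items (fun k => k.2) false
  let _rank_dict := pvRankDict sorted_item
  let _counter := PySem.Dict.counter _rank_dict.values  -- A's dead 'counter = Counter(...)' line
  ad.keys.foldl (fun r method =>
    r.modify method [] (fun l => l ++ [_rank_dict.getD method 0])) ranking

def get_ranking (adtm_dict : List (String × List Int)) (num_ranking : Int) :
    List (String × List Int) :=
  let ad := PySem.Dict.ofList adtm_dict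
  let ranking_dict := ad.keys.foldl (fun d method => d.insert method ([] : List Int)) PySem.Dict.empty
  ((PySem.List.pyRange 0 num_ranking 1).foldl (pvIndexStep ad) ranking_dict).items

-- ===== PORT B =====
-- B's rank: 1 + number of methods whose value at index i is strictly smaller
def pvRankAlt (ad : PySem.Dict String (List Int)) (methods : List String)
    (i : Int) (m : String) : Int :=
  1 + (methods.map (fun o =>
        if PySem.List.pyGetD (ad.getD o []) i 0 < PySem.List.pyGetD (ad.getD m []) i 0
        then (1 : Int) else 0)).sum

def get_ranking_alt (adtm_dict : List (String × List Int)) (num_ranking : Int) :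
    List (String × List Int) :=
  let ad := PySem.Dict.ofList adtm_dict
  let methods := ad.keys
  methods.map (fun m =>
    (m, (PySem.List.pyRange 0 num_ranking 1).map (fun i => pvRankAlt ad methods i m)))

-- ===== PRECONDITION & SPEC =====
-- Pre_ excludes exactly the inputs where Python A raises IndexError: some method's value
-- list (in the dict the input denotes) is shorter than num_ranking.
def Pre_get_ranking (adtm_dict : List (String × List Int)) (num_ranking : Int) : Prop :=
  ∀ p ∈ (PySem.Dict.ofList adtm_dict).items, num_ranking ≤ (p.2.length : Int)
instance (adtm_dict : List (String × List Int)) (num_ranking : Int) :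
    Decidable (Pre_get_ranking adtm_dict num_ranking) := by
  unfold Pre_get_ranking; infer_instance

def pvWitness_get_ranking : (List (String × List Int)) × Int :=
  ([("lite-bo", [3, 1]), ("smac", [2, 2]), ("random", [2, 5])], 2)

def Spec_get_ranking (adtm_dict : List (String × List Int)) (num_ranking : Int)
    (out : List (String × List Int)) : Prop := out = get_ranking_alt adtm_dict num_ranking
instance (adtm_dict : List (String × List Int)) (num_ranking : Int)
    (out : List (String × List Int)) : Decidable (Spec_get_ranking adtm_dict num_ranking out) := by
  unfold Spec_get_ranking; infer_instance

-- ===== CLAIM (what is proved, stated in full; the proofs are below) =====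
def Claim_equal_get_ranking : Prop := ∀ (adtm_dict : List (String × List Int)) (num_ranking : Int), Dom_get_ranking adtm_dict num_ranking → Pre_get_ranking adtm_dict num_ranking → Spec_get_ranking adtm_dict num_ranking (get_ranking adtm_dict num_ranking)

-- ===== LEMMAS AND PROOFS =====

-- A's rank for method m at index i (lookup in _rank_dict)
def pvRankA (ad : PySem.Dict String (List Int)) (i : Int) (m : String) : Int :=
  (pvRankDict (PySem.List.sorted (pvValueDict ad i).items (fun k => k.2) false)).getD m 0

lemma items_insertFold {ν : Type} (ms : List String) (f : String → ν) (hnd : ms.Nodup) :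
    (ms.foldl (fun d m => d.insert m (f m)) (PySem.Dict.empty : PySem.Dict String ν)).items
      = ms.map (fun m => (m, f m)) := by
  have h := PySem.Dict.items_foldl_insert_fresh ms (fun m => m) f PySem.Dict.empty
    (fun a _ => PySem.Dict.contains_empty a) (by simpa using hnd)
  simpa [PySem.Dict.empty] using h

lemma countP_lt_add_eq (p : List (String × Int)) (lv : Int) (h : ∀ y ∈ p, y.2 ≤ lv) :
    p.countP (fun r => r.2 < lv) + p.countP (fun r => r.2 == lv) = p.length := by
  induction p with
  | nil => simp
  | cons a t ih =>
    have ha := h a (by simp)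
    have ht := ih (fun y hy => h y (by simp [hy]))
    simp only [List.countP_cons, List.length_cons]
    rcases lt_or_eq_of_le ha with h1 | h1
    · simp [h1, ne_of_lt h1]; omega
    · simp [h1]; omega

lemma filter_map_pair (ms : List String) (f : String → Int) (m : String)
    (hnd : ms.Nodup) (hm : m ∈ ms) :
    (ms.map (fun o => (o, f o))).filter (fun p => p.1 == m) = [(m, f m)] := by
  induction ms with
  | nil => cases hm
  | cons a t ih =>
    rcases List.mem_cons.mp hm with h | h
    · subst h
      have hnot : ∀ x ∈ t.map (fun o => (o, f o)), ¬ (x.1 == m) = true := by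
        intro x hx
        obtain ⟨o, ho, rfl⟩ := List.mem_map.mp hx
        simp only [beq_iff_eq]
        intro h; exact (List.nodup_cons.mp hnd).1 (h ▸ ho)
      simp [List.filter_eq_nil_iff.mpr hnot]
    · have hne : (a == m) = false := by
        simp only [beq_eq_false_iff_ne]; intro hh
        exact (List.nodup_cons.mp hnd).1 (hh ▸ h)
      simp only [List.map_cons, List.filter_cons, hne]
      simpa using ih (List.nodup_cons.mp hnd).2 h

lemma pvSetUpdate_eq (s l : List String) (h : ∀ x ∈ l, x ∈ s) :
    PySem.Set.update s l = s := by
  induction l generalizing s with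
  | nil => rfl
  | cons a t ih =>
    have ha : PySem.Set.add s a = s := by
      simp [PySem.Set.add, PySem.Set.contains, h a (by simp)]
    have hstep : PySem.Set.update s (a :: t) = PySem.Set.update (PySem.Set.add s a) t := rfl
    rw [hstep, ha]
    exact ih s (fun x hx => h x (by simp [hx]))

lemma scan_loop (s : List (String × Int))
    (hsort : List.Pairwise (fun a b => a.2 ≤ b.2) s)
    (hnd : (s.map Prod.fst).Nodup) :
    ∀ (t p : List (String × Int)) (last : String × Int) (rd : PySem.Dict String Int),
      s = p ++ t → p.getLast? = some last →
      (∀ q ∈ p, rd.getD q.1 0 = 1 + (p.countP (fun r => r.2 < q.2) : Int)) →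
      ∀ q ∈ s,
        ((PySem.List.enumerate t (p.length : Int)).foldl (pvStepScan s)
          (rd, 1 + (p.countP (fun r => r.2 < last.2) : Int),
               (p.countP (fun r => r.2 == last.2) : Int))).1.getD q.1 0
        = 1 + (s.countP (fun r => r.2 < q.2) : Int) := by
  intro t
  induction t with
  | nil =>
    intro p last rd hps hlast hrd q hq
    have hp : p = s := by simpa using hps.symm
    subst hp
    simpa [PySem.List.enumerate_nil] using hrd q hq
  | cons c t' ih =>
    intro p last rd hps hlast hrd q hq
    obtain ⟨p₀, hp₀⟩ := List.getLast?_eq_some_iff.mp hlast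
    have hlen1 : 1 ≤ p.length := by rw [hp₀]; simp
    have hpair : List.Pairwise (fun a b : String × Int => a.2 ≤ b.2) p := by
      have h := hsort; rw [hps] at h; exact (List.pairwise_append.mp h).1
    have hple : ∀ y ∈ p, y.2 ≤ last.2 := by
      intro y hy
      rw [hp₀] at hpair hy
      rcases List.mem_append.mp hy with h | h
      · exact (List.pairwise_append.mp hpair).2.2 y h last (by simp)
      · simp at h; rw [h]
    have hlastc : last.2 ≤ c.2 := by
      have h := hsort; rw [hps] at h
      exact (List.pairwise_append.mp h).2.2 last (by rw [hp₀]; simp) c (by simp)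
    have hcnotp : c.1 ∉ p.map Prod.fst := by
      have hnd' : (p.map Prod.fst ++ (c :: t').map Prod.fst).Nodup := by
        rw [← List.map_append, ← hps]; exact hnd
      have hdisj := (List.nodup_append.mp hnd').2.2
      intro hmem
      exact hdisj c.1 hmem c.1 (by simp) rfl
    have hprev : PySem.List.pyGetD s ((p.length : Int) - 1) ("", 0) = last := by
      have hs' : s = p₀ ++ last :: (c :: t') := by rw [hps, hp₀]; simp
      have hlenp : (p.length : Int) - 1 = ((p₀.length : Nat) : Int) := by
        rw [hp₀]
        have hA : (p₀ ++ [last]).length = p₀.length + 1 := by simp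
        omega
      rw [hlenp, hs', PySem.List.pyGetD_natCast]
      rw [List.getD_eq_getElem?_getD]
      rw [List.getElem?_append_right (le_refl _)]
      simp
    rw [PySem.List.enumerate_cons, List.foldl_cons]
    have hcur0 : ((1 + ((p.countP (fun r => r.2 < last.2) : Nat) : Int)) == 0) = false := by
      simp only [beq_eq_false_iff_ne, ne_eq]
      omega
    by_cases hc : c.2 = last.2
    · have hstep : pvStepScan s
          (rd, 1 + (p.countP (fun r => r.2 < last.2) : Int),
           (p.countP (fun r => r.2 == last.2) : Int)) ((p.length : Int), c)
          = (rd.insert c.1 (1 + (p.countP (fun r => r.2 < last.2) : Int)),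
             1 + (p.countP (fun r => r.2 < last.2) : Int),
             (p.countP (fun r => r.2 == last.2) : Int) + 1) := by
        simp [pvStepScan, hcur0, hprev, hc]
      rw [hstep]
      have h1 : s = (p ++ [c]) ++ t' := by rw [hps]; simp
      have h2 : (p ++ [c]).getLast? = some c := by simp
      have hrd' : ∀ q' ∈ p ++ [c],
          (rd.insert c.1 (1 + (p.countP (fun r => r.2 < last.2) : Int))).getD q'.1 0
            = 1 + ((p ++ [c]).countP (fun r => r.2 < q'.2) : Int) := by
        intro q' hq'
        rcases List.mem_append.mp hq' with h | h
        · have hne : q'.1 ≠ c.1 := fun hh => hcnotp (hh ▸ List.mem_map_of_mem h)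
          rw [PySem.Dict.getD_insert, if_neg hne, hrd q' h]
          have hf : (decide (c.2 < q'.2)) = false := by
            simp only [decide_eq_false_iff_not, not_lt]
            rw [hc]; exact hple q' h
          simp [List.countP_append, hf]
        · simp only [List.mem_singleton] at h
          rw [h, PySem.Dict.getD_insert, if_pos rfl]
          simp [List.countP_append, hc]
      have hmain := ih (p ++ [c]) c _ h1 h2 hrd' q hq
      have e0 : (((p ++ [c]).length : Nat) : Int) = (p.length : Int) + 1 := by
        have hA : (p ++ [c]).length = p.length + 1 := by simp
        omega
      have e1 : 1 + (((p ++ [c]).countP (fun r => r.2 < c.2)) : Int)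
          = 1 + (p.countP (fun r => r.2 < last.2) : Int) := by
        simp [List.countP_append, hc]
      have e2 : (((p ++ [c]).countP (fun r => r.2 == c.2)) : Int)
          = (p.countP (fun r => r.2 == last.2) : Int) + 1 := by
        simp [List.countP_append, hc]
      rw [e0, e1, e2] at hmain
      exact hmain
    · have hlt : last.2 < c.2 := lt_of_le_of_ne hlastc (fun h => hc h.symm)
      have hstep : pvStepScan s
          (rd, 1 + (p.countP (fun r => r.2 < last.2) : Int),
           (p.countP (fun r => r.2 == last.2) : Int)) ((p.length : Int), c)
          = (rd.insert c.1 (1 + (p.countP (fun r => r.2 < last.2) : Int)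
                              + (p.countP (fun r => r.2 == last.2) : Int)),
             1 + (p.countP (fun r => r.2 < last.2) : Int)
               + (p.countP (fun r => r.2 == last.2) : Int), 1) := by
        simp [pvStepScan, hcur0, hprev, hc]
      rw [hstep]
      have hall : ∀ y ∈ p, y.2 < c.2 := fun y hy => lt_of_le_of_lt (hple y hy) hlt
      have hcount : p.countP (fun r => r.2 < c.2) = p.length :=
        List.countP_eq_length.mpr (fun y hy => by simpa using hall y hy)
      have hsplit := countP_lt_add_eq p last.2 hple
      have h1 : s = (p ++ [c]) ++ t' := by rw [hps]; simp
      have h2 : (p ++ [c]).getLast? = some c := by simp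
      have ecur : 1 + (p.countP (fun r => r.2 < last.2) : Int)
            + (p.countP (fun r => r.2 == last.2) : Int)
          = 1 + (((p ++ [c]).countP (fun r => r.2 < c.2)) : Int) := by
        have hf : (decide (c.2 < c.2)) = false := by simp
        simp only [List.countP_append, List.countP_cons, List.countP_nil, hf]
        push_cast [hcount]
        omega
      have egap : (((p ++ [c]).countP (fun r => r.2 == c.2)) : Int) = 1 := by
        have h0 : p.countP (fun r => r.2 == c.2) = 0 :=
          List.countP_eq_zero.mpr (fun y hy => by
            have hne := ne_of_lt (hall y hy)
            simp [hne])
        simp [List.countP_append, h0]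
      have hrd' : ∀ q' ∈ p ++ [c],
          (rd.insert c.1 (1 + (p.countP (fun r => r.2 < last.2) : Int)
                            + (p.countP (fun r => r.2 == last.2) : Int))).getD q'.1 0
            = 1 + ((p ++ [c]).countP (fun r => r.2 < q'.2) : Int) := by
        intro q' hq'
        rcases List.mem_append.mp hq' with h | h
        · have hne : q'.1 ≠ c.1 := fun hh => hcnotp (hh ▸ List.mem_map_of_mem h)
          rw [PySem.Dict.getD_insert, if_neg hne, hrd q' h]
          have hf : (decide (c.2 < q'.2)) = false := by
            simp only [decide_eq_false_iff_not, not_lt]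
            exact le_of_lt (hall q' h)
          simp [List.countP_append, hf]
        · simp only [List.mem_singleton] at h
          rw [h, PySem.Dict.getD_insert, if_pos rfl]
          exact ecur
      have hmain := ih (p ++ [c]) c _ h1 h2 hrd' q hq
      have e0 : (((p ++ [c]).length : Nat) : Int) = (p.length : Int) + 1 := by
        have hA : (p ++ [c]).length = p.length + 1 := by simp
        omega
      rw [e0, ← ecur, egap] at hmain
      exact hmain

lemma scan_all (s : List (String × Int))
    (hsort : List.Pairwise (fun a b => a.2 ≤ b.2) s)
    (hnd : (s.map Prod.fst).Nodup) :
    ∀ q ∈ s, (pvRankDict s).getD q.1 0 = 1 + (s.countP (fun r => r.2 < q.2) : Int) := by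
  intro q hq
  unfold pvRankDict
  cases s with
  | nil => exact absurd hq (List.not_mem_nil)
  | cons h rest =>
    have henum : PySem.List.enumerate (h :: rest) 0 = (0, h) :: PySem.List.enumerate rest 1 := by
      rw [PySem.List.enumerate_cons]; norm_num
    rw [henum, List.foldl_cons]
    have hstep : pvStepScan (h :: rest) (PySem.Dict.empty, 0, 1) (0, h)
        = (PySem.Dict.empty.insert h.1 1, 1, 1) := by
      simp [pvStepScan]
    rw [hstep]
    have hrd1 : ∀ q' ∈ ([h] : List (String × Int)),
        (PySem.Dict.empty.insert h.1 1).getD q'.1 0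
          = 1 + (([h] : List (String × Int)).countP (fun r => r.2 < q'.2) : Int) := by
      intro q' hq'
      simp only [List.mem_singleton] at hq'; subst hq'
      rw [PySem.Dict.getD_insert, if_pos rfl]
      simp
    have hmain := scan_loop (h :: rest) hsort hnd rest [h] h _ rfl rfl hrd1 q hq
    simpa using hmain

lemma rank_eq (ad : PySem.Dict String (List Int)) (hnd : ad.keys.Nodup)
    (i : Int) (m : String) (hm : m ∈ ad.keys) :
    pvRankA ad i m = pvRankAlt ad ad.keys i m := by
  have hitems : (pvValueDict ad i).items
      = ad.keys.map (fun o => (o, PySem.List.pyGetD (ad.getD o []) i 0)) :=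
    items_insertFold ad.keys _ hnd
  have hsort := PySem.List.sorted_pairwise (pvValueDict ad i).items
    (fun k : String × Int => k.2)
  have hperm := PySem.List.sorted_perm (pvValueDict ad i).items
    (fun k : String × Int => k.2) false
  have hndfst : ((PySem.List.sorted (pvValueDict ad i).items
      (fun k : String × Int => k.2) false).map Prod.fst).Nodup := by
    rw [(hperm.map Prod.fst).nodup_iff]
    rw [hitems, List.map_map]
    have hcomp : (Prod.fst ∘ fun o => (o, PySem.List.pyGetD (ad.getD o []) i 0))
        = fun o : String => o := by funext o; rfl
    rw [hcomp, List.map_id']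
    exact hnd
  have hqmem : (m, PySem.List.pyGetD (ad.getD m []) i 0)
      ∈ PySem.List.sorted (pvValueDict ad i).items (fun k : String × Int => k.2) false := by
    rw [PySem.List.mem_sorted, hitems]
    exact List.mem_map_of_mem hm
  have hscan' : pvRankA ad i m
      = 1 + ((PySem.List.sorted (pvValueDict ad i).items
          (fun k : String × Int => k.2) false).countP
          (fun r => decide (r.2 < PySem.List.pyGetD (ad.getD m []) i 0)) : Int) :=
    scan_all _ hsort hndfst _ hqmem
  rw [hscan']
  have hcnt : (PySem.List.sorted (pvValueDict ad i).items
      (fun k : String × Int => k.2) false).countP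
      (fun r => decide (r.2 < PySem.List.pyGetD (ad.getD m []) i 0))
      = ad.keys.countP (fun o =>
          decide (PySem.List.pyGetD (ad.getD o []) i 0 < PySem.List.pyGetD (ad.getD m []) i 0)) := by
    rw [hperm.countP_eq, hitems, List.countP_map]
    rfl
  rw [hcnt]
  have hsum := PySem.List.sum_map_ite_one_zero
    (fun o => decide (PySem.List.pyGetD (ad.getD o []) i 0 < PySem.List.pyGetD (ad.getD m []) i 0))
    ad.keys
  simp only [decide_eq_true_eq] at hsum
  unfold pvRankAlt
  rw [hsum]

lemma outer_inv (ad : PySem.Dict String (List Int)) (hnd : ad.keys.Nodup) (L : List Int) :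
    (L.foldl (pvIndexStep ad)
      (ad.keys.foldl (fun d m => d.insert m ([] : List Int)) PySem.Dict.empty)).keys = ad.keys
    ∧ ∀ m ∈ ad.keys,
      (L.foldl (pvIndexStep ad)
        (ad.keys.foldl (fun d m => d.insert m ([] : List Int)) PySem.Dict.empty)).getD m []
        = L.map (fun i => pvRankA ad i m) := by
  induction L using List.reverseRecOn with
  | nil =>
    simp only [List.foldl_nil, List.map_nil]
    have hitems : (ad.keys.foldl (fun d m => d.insert m ([] : List Int)) PySem.Dict.empty).items
        = ad.keys.map (fun m => (m, ([] : List Int))) := items_insertFold ad.keys _ hnd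
    have hkeys : (ad.keys.foldl (fun d m => d.insert m ([] : List Int)) PySem.Dict.empty).keys
        = ad.keys := by
      rw [show (ad.keys.foldl (fun d m => d.insert m ([] : List Int)) PySem.Dict.empty).keys
          = (ad.keys.foldl (fun d m => d.insert m ([] : List Int))
              PySem.Dict.empty).items.map (fun p => p.1) from rfl]
      rw [hitems, List.map_map]
      have hcomp : ((fun p : String × List Int => p.1) ∘ fun m => (m, ([] : List Int)))
          = fun o : String => o := by funext o; rfl
      rw [hcomp, List.map_id']
    refine ⟨hkeys, ?_⟩
    intro m hm
    have hmem : (m, ([] : List Int))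
        ∈ (ad.keys.foldl (fun d m => d.insert m ([] : List Int)) PySem.Dict.empty).items := by
      rw [hitems]; exact List.mem_map_of_mem hm
    exact PySem.Dict.getD_of_mem_items _ hmem (by rw [hkeys]; exact hnd) []
  | append_singleton L i ih =>
    obtain ⟨hk, hv⟩ := ih
    rw [List.foldl_append, List.foldl_cons, List.foldl_nil]
    have hform : pvIndexStep ad
        (L.foldl (pvIndexStep ad)
          (ad.keys.foldl (fun d m => d.insert m ([] : List Int)) PySem.Dict.empty)) i
        = (ad.keys.map (fun o => (o, pvRankA ad i o))).foldl
            (fun d p => d.modify p.1 [] (fun l => l ++ [p.2]))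
            (L.foldl (pvIndexStep ad)
              (ad.keys.foldl (fun d m => d.insert m ([] : List Int)) PySem.Dict.empty)) := by
      simp only [pvIndexStep]
      rw [List.foldl_map]
      rfl
    rw [hform]
    constructor
    · refine (PySem.Dict.keys_foldl_modify_key _ _ _ _ _).trans ?_
      rw [hk]
      have hcomp : (Prod.fst ∘ fun o => (o, pvRankA ad i o)) = fun o : String => o := by
        funext o; rfl
      have hmm : ((ad.keys.map (fun o => (o, pvRankA ad i o))).map Prod.fst) = ad.keys := by
        rw [List.map_map, hcomp, List.map_id']
      rw [hmm]
      exact pvSetUpdate_eq _ _ (fun x hx => hx)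
    · intro m hm
      rw [PySem.Dict.getD_foldl_modify_append]
      rw [filter_map_pair ad.keys (fun o => pvRankA ad i o) m hnd hm]
      rw [hv m hm]
      simp

-- ===== VERDICT (by name: the statement is the Claim_ definition above) =====
theorem get_ranking_spec : Claim_equal_get_ranking := by
  intro adtm_dict num_ranking _ _
  unfold Spec_get_ranking
  have hnd := PySem.Dict.nodup_keys_ofList adtm_dict
  obtain ⟨hk, hv⟩ := outer_inv (PySem.Dict.ofList adtm_dict) hnd
    (PySem.List.pyRange 0 num_ranking 1)
  have hknd : ((PySem.List.pyRange 0 num_ranking 1).foldl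
      (pvIndexStep (PySem.Dict.ofList adtm_dict))
      ((PySem.Dict.ofList adtm_dict).keys.foldl
        (fun d m => d.insert m ([] : List Int)) PySem.Dict.empty)).keys.Nodup := by
    rw [hk]; exact hnd
  have hitems := PySem.Dict.items_eq_map_keys _ hknd ([] : List Int)
  refine Eq.trans hitems ?_
  rw [hk]
  show _ = (PySem.Dict.ofList adtm_dict).keys.map (fun m =>
      (m, (PySem.List.pyRange 0 num_ranking 1).map
        (fun i => pvRankAlt (PySem.Dict.ofList adtm_dict)
          (PySem.Dict.ofList adtm_dict).keys i m)))
  apply List.map_congr_left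
  intro m hm
  rw [hv m hm]
  exact congrArg (Prod.mk m)
    (List.map_congr_left (fun i _ => rank_eq _ hnd i m hm))
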